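-- pv_equiv track=rewrite | github.com/nus-mtp/another-cs-study-planner | test/test_mod_associated_with_mod.py | is_equal_after_split_and_remove_spaces_and_sort
-- ===== SOURCE A (Python) =====
-- def remove_spaces(string_to_remove_spaces):
--     '''
--         Trims all spaces from given string
--     '''
--     string_to_remove_spaces = string_to_remove_spaces.strip(" ")
--     return string_to_remove_spaces
--
-- def is_equal_after_split_and_remove_spaces_and_sort(split_by, list_1, list_2):
--     '''
--         Splits both lists by given split_by parameter, and checks if both lists
--         contains the same elements (ignore spaces and order of elements)
--         Returns true if they are the same and false otherwise.
--     '''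
--     list_1 = list_1.split(split_by)
--     list_2 = list_2.split(split_by)
--
--     list_1 = [remove_spaces(component) for component in list_1]
--     list_2 = [remove_spaces(component) for component in list_2]
--
--     list_1.sort()
--     list_2.sort()
--
--     return list_1 == list_2
-- ===== SOURCE B (Python) =====
-- def is_equal_after_split_and_remove_spaces_and_sort(split_by, list_1, list_2):
--     '''
--         Single-pass frequency balance: count each stripped part of list_1 up
--         and each stripped part of list_2 down; equal multisets iff all zero.
--     '''
--     counts = {}
--     for part in list_1.split(split_by):
--         key = part.strip(" ")
--         counts[key] = counts.get(key, 0) + 1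
--     for part in list_2.split(split_by):
--         key = part.strip(" ")
--         counts[key] = counts.get(key, 0) - 1
--     return all(v == 0 for v in counts.values())
-- ===== Notes on version B (the rewrite author's own statement) =====
-- stated objective: alternative
-- what changed: Replaces sort-both-lists-then-compare with a single frequency dict that counts parts of list_1 up and parts of list_2 down and checks all balances are zero (O(n) expected instead of O(n log n)).
import Mathlib
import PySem

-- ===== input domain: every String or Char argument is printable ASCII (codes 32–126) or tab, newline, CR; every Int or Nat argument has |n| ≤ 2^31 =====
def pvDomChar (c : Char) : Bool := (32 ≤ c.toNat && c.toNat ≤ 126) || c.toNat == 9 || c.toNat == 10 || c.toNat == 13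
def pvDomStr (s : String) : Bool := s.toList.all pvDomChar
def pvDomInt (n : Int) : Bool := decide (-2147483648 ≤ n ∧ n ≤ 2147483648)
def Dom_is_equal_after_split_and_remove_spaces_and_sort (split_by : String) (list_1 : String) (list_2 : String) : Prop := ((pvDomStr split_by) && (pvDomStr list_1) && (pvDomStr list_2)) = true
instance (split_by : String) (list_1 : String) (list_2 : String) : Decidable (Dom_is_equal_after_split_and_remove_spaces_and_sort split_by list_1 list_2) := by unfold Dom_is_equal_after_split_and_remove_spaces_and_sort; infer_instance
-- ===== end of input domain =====

-- B replaces sort-both-then-compare by one frequency dict (count list_1's stripped parts up,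
-- list_2's down, check all balances are zero); return value proved equal on Pre_ (nonempty separator).

-- ===== PORT A =====
def pv_remove_spaces (string_to_remove_spaces : String) : String :=
  PySem.Str.stripChars string_to_remove_spaces " "

def is_equal_after_split_and_remove_spaces_and_sort (split_by : String) (list_1 : String) (list_2 : String) : Bool :=
  let l1 := (PySem.Str.split? list_1 split_by).getD []
  let l2 := (PySem.Str.split? list_2 split_by).getD []
  let l1 := l1.map (fun component => pv_remove_spaces component)
  let l2 := l2.map (fun component => pv_remove_spaces component)
  let l1 := PySem.List.sorted l1 (fun x => x) false
  let l2 := PySem.List.sorted l2 (fun x => x) false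
  l1 == l2

-- ===== PORT B =====
def is_equal_after_split_and_remove_spaces_and_sort_alt (split_by : String) (list_1 : String) (list_2 : String) : Bool :=
  let counts : PySem.Dict String Int := PySem.Dict.empty
  let counts := ((PySem.Str.split? list_1 split_by).getD []).foldl
    (fun counts part =>
      let key := PySem.Str.stripChars part " "
      counts.insert key (counts.getD key 0 + 1)) counts
  let counts := ((PySem.Str.split? list_2 split_by).getD []).foldl
    (fun counts part =>
      let key := PySem.Str.stripChars part " "
      counts.insert key (counts.getD key 0 - 1)) counts
  counts.values.all (fun v => v == 0)

-- ===== PRECONDITION & SPEC =====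
-- Python str.split raises ValueError("empty separator") on split_by = "" (in A and in B alike).
def Pre_is_equal_after_split_and_remove_spaces_and_sort (split_by : String) (list_1 : String) (list_2 : String) : Prop := split_by ≠ ""
instance (split_by : String) (list_1 : String) (list_2 : String) : Decidable (Pre_is_equal_after_split_and_remove_spaces_and_sort split_by list_1 list_2) := by unfold Pre_is_equal_after_split_and_remove_spaces_and_sort; infer_instance
def pvWitness_is_equal_after_split_and_remove_spaces_and_sort : String × String × String := (",", "a, b", "b ,a")
def Spec_is_equal_after_split_and_remove_spaces_and_sort (split_by : String) (list_1 : String) (list_2 : String) (out : Bool) : Prop := out = is_equal_after_split_and_remove_spaces_and_sort_alt split_by list_1 list_2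
instance (split_by : String) (list_1 : String) (list_2 : String) (out : Bool) : Decidable (Spec_is_equal_after_split_and_remove_spaces_and_sort split_by list_1 list_2 out) := by unfold Spec_is_equal_after_split_and_remove_spaces_and_sort; infer_instance

-- ===== CLAIM (what is proved, stated in full; the proofs are below) =====
def Claim_equal_is_equal_after_split_and_remove_spaces_and_sort : Prop := ∀ (split_by : String) (list_1 : String) (list_2 : String), Dom_is_equal_after_split_and_remove_spaces_and_sort split_by list_1 list_2 → Pre_is_equal_after_split_and_remove_spaces_and_sort split_by list_1 list_2 → Spec_is_equal_after_split_and_remove_spaces_and_sort split_by list_1 list_2 (is_equal_after_split_and_remove_spaces_and_sort split_by list_1 list_2)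

-- ===== LEMMAS AND PROOFS =====

-- decrement twin of PySem.Dict.getD_foldl_insert_add_one
theorem pv_getD_foldl_insert_sub_one (l : List String) (d : PySem.Dict String Int) (v : String) :
    (l.foldl (fun d x => d.insert x (d.getD x 0 - 1)) d).getD v 0 = d.getD v 0 - (l.count v : Int) := by
  induction l generalizing d with
  | nil => simp
  | cons x xs ih =>
    simp only [List.foldl_cons, ih, PySem.Dict.getD_insert, List.count_cons]
    by_cases h : v = x
    · simp [h]; ring
    · simp [h, Ne.symm h]

theorem pv_balance_all_zero_iff (l1 l2 : List String) :
    ((l2.foldl (fun d x => d.insert x (d.getD x 0 - 1))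
      (l1.foldl (fun d x => d.insert x (d.getD x 0 + 1)) (PySem.Dict.empty : PySem.Dict String Int))).values.all
        (fun v => v == 0)) = true ↔ l1.Perm l2 := by
  set d1 := l1.foldl (fun d x => d.insert x (d.getD x 0 + 1)) (PySem.Dict.empty : PySem.Dict String Int) with hd1
  set d2 := l2.foldl (fun d x => d.insert x (d.getD x 0 - 1)) d1 with hd2
  have hn1 : d1.keys.Nodup := PySem.Dict.nodup_keys_foldl_insert _ _ _ PySem.Dict.nodup_keys_empty
  have hn2 : d2.keys.Nodup := PySem.Dict.nodup_keys_foldl_insert _ _ _ hn1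
  have hget : ∀ v, d2.getD v 0 = (l1.count v : Int) - (l2.count v : Int) := by
    intro v
    rw [hd2, pv_getD_foldl_insert_sub_one, hd1, PySem.Dict.getD_foldl_insert_add_one]
    simp
  have hkeys : ∀ v, v ∈ d2.keys ↔ v ∈ l1 ∨ v ∈ l2 := by
    intro v
    rw [hd2, PySem.Dict.keys_foldl_insert, hd1, PySem.Dict.keys_foldl_insert]
    simp [PySem.Set.mem_update, PySem.Dict.keys_empty]
  rw [PySem.Dict.values_eq_map_keys d2 hn2 0, List.all_map, List.all_eq_true]
  constructor
  · intro h
    rw [List.perm_iff_count]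
    intro v
    by_cases hv : v ∈ l1 ∨ v ∈ l2
    · have := h v ((hkeys v).2 hv)
      simp only [hget v, Function.comp, beq_iff_eq, sub_eq_zero] at this
      exact_mod_cast this
    · rw [not_or] at hv
      rw [List.count_eq_zero_of_not_mem hv.1, List.count_eq_zero_of_not_mem hv.2]
  · intro hp v _
    have : l1.count v = l2.count v := List.perm_iff_count.1 hp v
    simp [hget v, this]

-- A's boolean is the permutation test on the stripped parts
theorem pv_A_eq_perm (m1 m2 : List String) :
    ((PySem.List.sorted m1 (fun x => x) false == PySem.List.sorted m2 (fun x => x) false) = true)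
      ↔ m1.Perm m2 := by
  rw [beq_iff_eq, PySem.List.sorted_id_eq_sorted_id_iff_perm]

-- ===== VERDICT (by name: the statement is the Claim_ definition above) =====
theorem is_equal_after_split_and_remove_spaces_and_sort_spec : Claim_equal_is_equal_after_split_and_remove_spaces_and_sort := by
  unfold Claim_equal_is_equal_after_split_and_remove_spaces_and_sort
  intro split_by list_1 list_2 _ _
  unfold Spec_is_equal_after_split_and_remove_spaces_and_sort
  unfold is_equal_after_split_and_remove_spaces_and_sort is_equal_after_split_and_remove_spaces_and_sort_alt
  simp only []
  rw [Bool.eq_iff_iff]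
  rw [pv_A_eq_perm]
  rw [show ∀ (p : List String) (d : PySem.Dict String Int),
        p.foldl (fun counts part => counts.insert (PySem.Str.stripChars part " ")
          (counts.getD (PySem.Str.stripChars part " ") 0 + 1)) d
        = (p.map (fun part => PySem.Str.stripChars part " ")).foldl
            (fun counts k => counts.insert k (counts.getD k 0 + 1)) d
      from fun p d => (List.foldl_map (f := fun part => PySem.Str.stripChars part " ")
        (g := fun (counts : PySem.Dict String Int) k => counts.insert k (counts.getD k 0 + 1))).symm]
  rw [show ∀ (p : List String) (d : PySem.Dict String Int),
        p.foldl (fun counts part => counts.insert (PySem.Str.stripChars part " ")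
          (counts.getD (PySem.Str.stripChars part " ") 0 - 1)) d
        = (p.map (fun part => PySem.Str.stripChars part " ")).foldl
            (fun counts k => counts.insert k (counts.getD k 0 - 1)) d
      from fun p d => (List.foldl_map (f := fun part => PySem.Str.stripChars part " ")
        (g := fun (counts : PySem.Dict String Int) k => counts.insert k (counts.getD k 0 - 1))).symm]
  rw [pv_balance_all_zero_iff]
  simp [pv_remove_spaces]
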